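-- pv_equiv track=rewrite | github.com/pkarthick/AdventOfCode | 2024/python/day14.py | christmas_tree_and_has_easter_egg
-- ===== SOURCE A (Python) =====
-- width = 101
--
-- height = 103
--
-- def christmas_tree_and_has_easter_egg(positions, continuous_count):
--
--     for r in range(height):
--         count = 0
--
--         for c in range(width):
--             if (r,c) in positions:
--                 count += 1
--                 if count == continuous_count:
--                     return True
--
--             else:
--                 count = 0
--
--     return False
-- ===== SOURCE B (Python) =====
-- width = 101
--
-- height = 103
--
-- def christmas_tree_and_has_easter_egg(positions, continuous_count):
--     # a run must have positive length
--     if continuous_count <= 0: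
--         return False
--     occupied = {(r, c) for r, c in positions if 0 <= r < height and 0 <= c < width}
--     for r, c in occupied:
--         # only test at the start of a run, then walk the window
--         if (r, c - 1) not in occupied and all((r, c + i) in occupied for i in range(continuous_count)):
--             return True
--     return False
-- ===== Notes on version B (the rewrite author's own statement) =====
-- stated objective: faster
-- what changed: A scans the whole 103x101 grid doing a linear list-membership test per cell; B builds a set of the in-range occupied cells once and, for each occupied cell that starts a run (its left neighbour is unoccupied), checks the window of continuous_count cells with O(1) set lookups.
import Mathlib
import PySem

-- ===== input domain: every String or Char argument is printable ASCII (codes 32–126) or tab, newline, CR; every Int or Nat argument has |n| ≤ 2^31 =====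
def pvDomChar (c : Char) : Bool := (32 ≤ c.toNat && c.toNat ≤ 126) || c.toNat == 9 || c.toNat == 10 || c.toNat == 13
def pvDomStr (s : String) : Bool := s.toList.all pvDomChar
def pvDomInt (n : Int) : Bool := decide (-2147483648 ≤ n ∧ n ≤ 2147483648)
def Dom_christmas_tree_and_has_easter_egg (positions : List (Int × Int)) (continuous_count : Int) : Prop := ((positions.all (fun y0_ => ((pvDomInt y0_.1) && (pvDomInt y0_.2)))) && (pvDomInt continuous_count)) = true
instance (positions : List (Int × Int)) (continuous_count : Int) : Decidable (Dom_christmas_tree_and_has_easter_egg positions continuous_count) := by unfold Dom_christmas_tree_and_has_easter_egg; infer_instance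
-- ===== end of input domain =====

-- B replaces A's full 103×101 grid scan (a list-membership test per cell) with one pass over the
-- set of in-range occupied cells, testing a window only at each run start (objective: faster).

-- ===== PORT A =====
-- inner loop: for c in range(width): if (r,c) in positions: count += 1; if count == continuous_count: return True; else: count = 0
def ctRow (positions : List (Int × Int)) (continuous_count r : Int) : List Int → Int → Bool
  | [], _ => false
  | c :: cs, count =>
    if (r, c) ∈ positions then
      (if count + 1 = continuous_count then true else ctRow positions continuous_count r cs (count + 1))
    else ctRow positions continuous_count r cs 0

def christmas_tree_and_has_easter_egg (positions : List (Int × Int)) (continuous_count : Int) : Bool :=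
  (PySem.List.pyRange 0 103 1).any (fun r =>
    ctRow positions continuous_count r (PySem.List.pyRange 0 101 1) 0)

-- ===== PORT B =====
-- all((r, c + i) in occupied for i in range(continuous_count)), short-circuiting like Python's all
def bWindow (occ : PySem.Set (Int × Int)) (continuous_count r c i : Int) : Bool :=
  if _h : i < continuous_count then
    if (r, c + i) ∈ occ then bWindow occ continuous_count r c (i + 1) else false
  else true
termination_by (continuous_count - i).toNat
decreasing_by omega

def christmas_tree_and_has_easter_egg_alt (positions : List (Int × Int)) (continuous_count : Int) : Bool :=
  if continuous_count ≤ 0 then false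
  else
    let occ : PySem.Set (Int × Int) :=
      PySem.Set.ofList (positions.filter (fun p => decide (0 ≤ p.1 ∧ p.1 < 103 ∧ 0 ≤ p.2 ∧ p.2 < 101)))
    -- for (r, c) in occupied: return True on the first run start whose window is full
    occ.any (fun p => !(decide ((p.1, p.2 - 1) ∈ occ)) && bWindow occ continuous_count p.1 p.2 0)

-- ===== PRECONDITION & SPEC =====
def Spec_christmas_tree_and_has_easter_egg (positions : List (Int × Int)) (continuous_count : Int) (out : Bool) : Prop := out = christmas_tree_and_has_easter_egg_alt positions continuous_count
instance (positions : List (Int × Int)) (continuous_count : Int) (out : Bool) : Decidable (Spec_christmas_tree_and_has_easter_egg positions continuous_count out) := by unfold Spec_christmas_tree_and_has_easter_egg; infer_instance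

-- ===== CLAIM (what is proved, stated in full; the proofs are below) =====
def Claim_equal_christmas_tree_and_has_easter_egg : Prop := ∀ (positions : List (Int × Int)) (continuous_count : Int), Dom_christmas_tree_and_has_easter_egg positions continuous_count → Spec_christmas_tree_and_has_easter_egg positions continuous_count (christmas_tree_and_has_easter_egg positions continuous_count)

-- ===== LEMMAS AND PROOFS =====

-- occupancy of an in-range cell (what B's set membership decides)
def OccIn (positions : List (Int × Int)) (r c : Int) : Prop :=
  (r, c) ∈ positions ∧ 0 ≤ r ∧ r < 103 ∧ 0 ≤ c ∧ c < 101

-- the common mathematical meaning: some row has a fully occupied window of length continuous_count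
def AProp (positions : List (Int × Int)) (cc : Int) : Prop :=
  ∃ r, 0 ≤ r ∧ r < 103 ∧ 1 ≤ cc ∧
    ∃ c, 0 ≤ c ∧ c + cc ≤ 101 ∧ ∀ j, c ≤ j → j < c + cc → (r, j) ∈ positions

def BProp (positions : List (Int × Int)) (cc : Int) : Prop :=
  1 ≤ cc ∧ ∃ r c, OccIn positions r c ∧ ¬ OccIn positions r (c - 1) ∧
    ∀ j, 0 ≤ j → j < cc → OccIn positions r (c + j)

-- ---------- A side ----------

lemma ctRow_sound (positions : List (Int × Int)) (cc r : Int) :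
    ∀ (n : Nat) (a k : Int), (101 - a).toNat = n → 0 ≤ k →
    (∀ j, a - k ≤ j → j < a → (r, j) ∈ positions) →
    ctRow positions cc r (PySem.List.pyRange a 101 1) k = true →
    1 ≤ cc ∧ ∃ c, a - k ≤ c ∧ c + cc ≤ 101 ∧ ∀ j, c ≤ j → j < c + cc → (r, j) ∈ positions := by
  intro n
  induction n with
  | zero =>
    intro a k hn _ _ htrue
    rw [PySem.List.pyRange_one_eq_nil (by omega)] at htrue
    simp [ctRow] at htrue
  | succ m ih =>
    intro a k hn hk hcred htrue
    rw [PySem.List.pyRange_one_cons (by omega)] at htrue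
    by_cases hP : (r, a) ∈ positions
    · by_cases hkc : k + 1 = cc
      · refine ⟨by omega, a - k, le_refl _, by omega, ?_⟩
        intro j hj1 hj2
        rcases lt_or_ge j a with h | h
        · exact hcred j hj1 h
        · have : j = a := by omega
          rw [this]; exact hP
      · simp only [ctRow, if_pos hP, if_neg hkc] at htrue
        obtain ⟨h1, c, hc1, hc2, hc3⟩ := ih (a + 1) (k + 1) (by omega) (by omega)
          (by intro j hj1 hj2
              rcases lt_or_ge j a with h | h
              · exact hcred j (by omega) h
              · have : j = a := by omega
                rw [this]; exact hP) htrue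
        exact ⟨h1, c, by omega, hc2, hc3⟩
    · simp only [ctRow, if_neg hP] at htrue
      obtain ⟨h1, c, hc1, hc2, hc3⟩ := ih (a + 1) 0 (by omega) (by omega)
        (by intro j hj1 hj2; omega) htrue
      exact ⟨h1, c, by omega, hc2, hc3⟩

lemma ctRow_complete (positions : List (Int × Int)) (cc r : Int) :
    ∀ (n : Nat) (a k : Int), (101 - a).toNat = n → 0 ≤ k → k < cc →
    (∃ c, a - k ≤ c ∧ c + cc ≤ 101 ∧ ∀ j, a ≤ j → c ≤ j → j < c + cc → (r, j) ∈ positions) →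
    ctRow positions cc r (PySem.List.pyRange a 101 1) k = true := by
  intro n
  induction n with
  | zero =>
    intro a k hn hk hkc ⟨c, hc1, hc2, _⟩
    omega
  | succ m ih =>
    intro a k hn hk hkc ⟨c, hc1, hc2, hc3⟩
    rw [PySem.List.pyRange_one_cons (by omega)]
    by_cases hP : (r, a) ∈ positions
    · by_cases hkc1 : k + 1 = cc
      · simp [ctRow, hP, hkc1]
      · simp only [ctRow, if_pos hP, if_neg hkc1]
        exact ih (a + 1) (k + 1) (by omega) (by omega) (by omega)
          ⟨c, by omega, hc2, fun j h1 h2 h3 => hc3 j (by omega) h2 h3⟩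
    · simp only [ctRow, if_neg hP]
      have hac : a < c := by
        by_contra h
        exact hP (hc3 a (le_refl _) (by omega) (by omega))
      exact ih (a + 1) 0 (by omega) (by omega) (by omega)
        ⟨c, by omega, hc2, fun j h1 h2 h3 => hc3 j (by omega) h2 h3⟩

lemma A_iff (positions : List (Int × Int)) (cc : Int) :
    christmas_tree_and_has_easter_egg positions cc = true ↔ AProp positions cc := by
  unfold christmas_tree_and_has_easter_egg AProp
  rw [List.any_eq_true]
  constructor
  · rintro ⟨r, hr, htrue⟩
    rw [PySem.List.mem_pyRange_one] at hr
    obtain ⟨h1, c, hc1, hc2, hc3⟩ :=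
      ctRow_sound positions cc r 101 0 0 (by decide) (le_refl _) (by intro j h1 h2; omega) htrue
    exact ⟨r, hr.1, hr.2, h1, c, by omega, hc2, hc3⟩
  · rintro ⟨r, hr1, hr2, h1, c, hc1, hc2, hc3⟩
    refine ⟨r, PySem.List.mem_pyRange_one.mpr ⟨hr1, hr2⟩, ?_⟩
    exact ctRow_complete positions cc r 101 0 0 (by decide) (le_refl _) (by omega)
      ⟨c, by omega, hc2, fun j _ h2 h3 => hc3 j h2 h3⟩

-- ---------- B side ----------

lemma mem_occ_iff (positions : List (Int × Int)) (r c : Int) :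
    (r, c) ∈ PySem.Set.ofList (positions.filter
      (fun p => decide (0 ≤ p.1 ∧ p.1 < 103 ∧ 0 ≤ p.2 ∧ p.2 < 101))) ↔ OccIn positions r c := by
  rw [PySem.Set.mem_ofList, List.mem_filter]
  simp [OccIn]

lemma bWindow_iff (occ : PySem.Set (Int × Int)) (cc r c : Int) :
    ∀ (n : Nat) (i : Int), (cc - i).toNat = n →
    (bWindow occ cc r c i = true ↔ ∀ j, i ≤ j → j < cc → (r, c + j) ∈ occ) := by
  intro n
  induction n with
  | zero =>
    intro i hn
    rw [bWindow, dif_neg (by omega)]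
    constructor
    · intro _ j hj1 hj2
      exact absurd hj2 (by omega)
    · intro _; rfl
  | succ m ih =>
    intro i hn
    rw [bWindow, dif_pos (by omega)]
    by_cases hP : (r, c + i) ∈ occ
    · rw [if_pos hP, ih (i + 1) (by omega)]
      constructor
      · intro h j h1 h2
        rcases lt_or_ge i j with h' | h'
        · exact h j (by omega) h2
        · have : j = i := by omega
          rw [this]; exact hP
      · intro h j h1 h2; exact h j (by omega) h2
    · rw [if_neg hP]
      constructor
      · intro h; cases h
      · intro h
        exact absurd (h i (le_refl _) (by omega)) hP

lemma B_iff (positions : List (Int × Int)) (cc : Int) :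
    christmas_tree_and_has_easter_egg_alt positions cc = true ↔ BProp positions cc := by
  unfold christmas_tree_and_has_easter_egg_alt BProp
  by_cases hcc : cc ≤ 0
  · rw [if_pos hcc]
    constructor
    · intro h; cases h
    · rintro ⟨h1, -⟩; exact absurd h1 (by omega)
  · rw [if_neg hcc]
    simp only [List.any_eq_true, Bool.and_eq_true, Bool.not_eq_true', decide_eq_false_iff_not]
    constructor
    · rintro ⟨⟨r, c⟩, hmem, hstart, hwin⟩
      rw [mem_occ_iff] at hmem hstart
      refine ⟨by omega, r, c, hmem, hstart, ?_⟩
      intro j h1 h2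
      rw [← mem_occ_iff]
      exact (bWindow_iff _ cc r c cc.toNat 0 (by omega)).mp hwin j h1 h2
    · rintro ⟨h1, r, c, hocc, hstart, hwin⟩
      refine ⟨(r, c), (mem_occ_iff positions r c).mpr hocc, (mem_occ_iff positions r (c - 1)).not.mpr hstart, ?_⟩
      rw [bWindow_iff _ cc r c cc.toNat 0 (by omega)]
      intro j hj1 hj2
      exact (mem_occ_iff positions r (c + j)).mpr (hwin j hj1 hj2)

-- ---------- bridge ----------

-- slide a fully occupied window leftwards to the start of its run
lemma slide (positions : List (Int × Int)) (cc r : Int) (hr1 : 0 ≤ r) (hr2 : r < 103) (hcc : 1 ≤ cc) :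
    ∀ (m : Nat) (c : Int), c.toNat = m → 0 ≤ c → c + cc ≤ 101 →
    (∀ j, c ≤ j → j < c + cc → (r, j) ∈ positions) →
    ∃ c', OccIn positions r c' ∧ ¬ OccIn positions r (c' - 1) ∧
      ∀ j, 0 ≤ j → j < cc → OccIn positions r (c' + j) := by
  intro m
  induction m using Nat.strong_induction_on with
  | _ m ih =>
    intro c hm hc0 hc101 hwin
    by_cases hrun : 1 ≤ c ∧ (r, c - 1) ∈ positions
    · exact ih (c - 1).toNat (by omega) (c - 1) rfl (by omega) (by omega)
        (by intro j hj1 hj2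
            rcases lt_or_ge j c with h | h
            · have : j = c - 1 := by omega
              rw [this]; exact hrun.2
            · exact hwin j h (by omega))
    · refine ⟨c, ⟨hwin c (le_refl _) (by omega), hr1, hr2, hc0, by omega⟩, ?_, ?_⟩
      · intro ⟨hmem, _, _, hge, _⟩
        exact hrun ⟨by omega, hmem⟩
      · intro j hj1 hj2
        exact ⟨hwin (c + j) (by omega) (by omega), hr1, hr2, by omega, by omega⟩

lemma AProp_iff_BProp (positions : List (Int × Int)) (cc : Int) :
    AProp positions cc ↔ BProp positions cc := by
  constructor
  · rintro ⟨r, hr1, hr2, hcc, c, hc1, hc2, hwin⟩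
    obtain ⟨c', h1, h2, h3⟩ := slide positions cc r hr1 hr2 hcc c.toNat c rfl hc1 hc2 hwin
    exact ⟨hcc, r, c', h1, h2, h3⟩
  · rintro ⟨hcc, r, c, hocc, _, hwin⟩
    obtain ⟨_, hr1, hr2, hc1, _⟩ := hocc
    refine ⟨r, hr1, hr2, hcc, c, hc1, ?_, ?_⟩
    · have := hwin (cc - 1) (by omega) (by omega)
      obtain ⟨_, _, _, _, h⟩ := this
      omega
    · intro j hj1 hj2
      have h := (hwin (j - c) (by omega) (by omega)).1
      simpa [show c + (j - c) = j by omega] using h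

lemma main_eq (positions : List (Int × Int)) (cc : Int) :
    christmas_tree_and_has_easter_egg positions cc = christmas_tree_and_has_easter_egg_alt positions cc := by
  have h : (christmas_tree_and_has_easter_egg positions cc = true) ↔
      (christmas_tree_and_has_easter_egg_alt positions cc = true) := by
    rw [A_iff, B_iff]; exact AProp_iff_BProp positions cc
  cases hx : christmas_tree_and_has_easter_egg positions cc <;>
  cases hy : christmas_tree_and_has_easter_egg_alt positions cc <;> simp_all

-- ===== VERDICT (by name: the statement is the Claim_ definition above) =====
theorem christmas_tree_and_has_easter_egg_spec : Claim_equal_christmas_tree_and_has_easter_egg := by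
  intro positions cc _
  unfold Spec_christmas_tree_and_has_easter_egg
  exact main_eq positions cc
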